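-- pv_equiv track=rewrite | github.com/Durgeshj11/cosmic-backend | app/main.py | get_astrology_score
-- ===== SOURCE A (Python) =====
-- def get_astrology_score(sign_a: str, sign_b: str) -> int:
--     elements = {"Fire": ["Aries", "Leo", "Sagittarius"], "Earth": ["Taurus", "Virgo", "Capricorn"], "Air": ["Gemini", "Libra", "Aquarius"], "Water": ["Cancer", "Scorpio", "Pisces"]}
--     def find_el(s): return next(k for k, v in elements.items() if s in v)
--     el_a, el_b = find_el(sign_a), find_el(sign_b)
--     if el_a == el_b: return 95
--     harmonies = [("Fire", "Air"), ("Earth", "Water")]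
--     if (el_a, el_b) in harmonies or (el_b, el_a) in harmonies: return 85
--     return 45
-- ===== SOURCE B (Python) =====
-- ZODIAC = ["Aries", "Taurus", "Gemini", "Cancer", "Leo", "Virgo",
--           "Libra", "Scorpio", "Sagittarius", "Capricorn", "Aquarius", "Pisces"]
--
-- def get_astrology_score(sign_a: str, sign_b: str) -> int:
--     # Zodiac order cycles Fire, Earth, Air, Water, so position mod 4 is the element index.
--     d = abs(ZODIAC.index(sign_a) % 4 - ZODIAC.index(sign_b) % 4)
--     return 95 if d == 0 else 85 if d == 2 else 45
-- ===== Notes on version B (the rewrite author's own statement) =====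
-- stated objective: simpler
-- what changed: B replaces the element dict, generator scan and harmony-pair membership tests by a single zodiac list: position mod 4 is the element index and the absolute index distance (0/2/other) yields 95/85/45 in closed form.
-- outside the precondition, e.g. on get_astrology_score('Aries', 'Dog'): A raises StopIteration, B raises ValueError
import Mathlib
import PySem

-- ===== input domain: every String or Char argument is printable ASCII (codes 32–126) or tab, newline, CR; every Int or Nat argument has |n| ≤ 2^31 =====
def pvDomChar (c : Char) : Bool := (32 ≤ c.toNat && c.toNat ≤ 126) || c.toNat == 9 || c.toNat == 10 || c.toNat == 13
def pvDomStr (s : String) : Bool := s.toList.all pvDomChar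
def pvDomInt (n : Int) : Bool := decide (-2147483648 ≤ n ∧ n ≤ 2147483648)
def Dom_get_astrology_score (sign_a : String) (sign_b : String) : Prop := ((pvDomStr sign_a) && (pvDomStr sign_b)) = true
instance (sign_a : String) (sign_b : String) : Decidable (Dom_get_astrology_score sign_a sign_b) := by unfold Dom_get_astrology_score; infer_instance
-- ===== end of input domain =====

-- B replaces the element dict + generator scan + harmony-pair tests by one zodiac list:
-- position mod 4 is the element index, and |diff| (0/2/other) gives 95/85/45 in closed form.
-- Both programs raise on an unknown sign (A: StopIteration, B: ValueError); Pre_ excludes those.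

-- ===== PORT A =====
def pvElements : List (String × List String) :=
  [("Fire", ["Aries", "Leo", "Sagittarius"]),
   ("Earth", ["Taurus", "Virgo", "Capricorn"]),
   ("Air", ["Gemini", "Libra", "Aquarius"]),
   ("Water", ["Cancer", "Scorpio", "Pisces"])]

-- find_el: first key whose value list contains s (next(...) raises → none)
def pvFindEl (s : String) : Option String :=
  (pvElements.find? (fun kv => kv.2.contains s)).map (·.1)

def get_astrology_score (sign_a : String) (sign_b : String) : Int :=
  match pvFindEl sign_a, pvFindEl sign_b with
  | some el_a, some el_b =>
    if el_a == el_b then 95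
    else
      let harmonies : List (String × String) := [("Fire", "Air"), ("Earth", "Water")]
      if harmonies.contains (el_a, el_b) || harmonies.contains (el_b, el_a) then 85
      else 45
  | _, _ => 0  -- StopIteration in Python; excluded by Pre_

-- ===== PORT B =====
def pvZodiac : List String :=
  ["Aries", "Taurus", "Gemini", "Cancer", "Leo", "Virgo",
   "Libra", "Scorpio", "Sagittarius", "Capricorn", "Aquarius", "Pisces"]

def get_astrology_score_alt (sign_a : String) (sign_b : String) : Int :=
  (((PySem.List.index? pvZodiac sign_a).bind fun ia =>
    (PySem.List.index? pvZodiac sign_b).map fun ib =>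
      let d : Int := |PySem.Int.mod (ia : Int) 4 - PySem.Int.mod (ib : Int) 4|
      if d == 0 then (95 : Int) else if d == 2 then 85 else 45)).getD 0
  -- none = ValueError in Python; excluded by Pre_

-- ===== PRECONDITION & SPEC =====
-- Pre_ excludes exactly the inputs where A raises StopIteration (a sign not among the 12).
def Pre_get_astrology_score (sign_a : String) (sign_b : String) : Prop :=
  sign_a ∈ ["Aries", "Taurus", "Gemini", "Cancer", "Leo", "Virgo",
            "Libra", "Scorpio", "Sagittarius", "Capricorn", "Aquarius", "Pisces"] ∧
  sign_b ∈ ["Aries", "Taurus", "Gemini", "Cancer", "Leo", "Virgo",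
            "Libra", "Scorpio", "Sagittarius", "Capricorn", "Aquarius", "Pisces"]
instance (sign_a : String) (sign_b : String) : Decidable (Pre_get_astrology_score sign_a sign_b) := by
  unfold Pre_get_astrology_score; infer_instance

def pvWitness_get_astrology_score : String × String := ("Leo", "Libra")

def Spec_get_astrology_score (sign_a : String) (sign_b : String) (out : Int) : Prop := out = get_astrology_score_alt sign_a sign_b
instance (sign_a : String) (sign_b : String) (out : Int) : Decidable (Spec_get_astrology_score sign_a sign_b out) := by unfold Spec_get_astrology_score; infer_instance

-- ===== CLAIM (what is proved, stated in full; the proofs are below) =====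
def Claim_equal_get_astrology_score : Prop := ∀ (sign_a : String) (sign_b : String), Dom_get_astrology_score sign_a sign_b → Pre_get_astrology_score sign_a sign_b → Spec_get_astrology_score sign_a sign_b (get_astrology_score sign_a sign_b)

-- ===== LEMMAS AND PROOFS =====

-- ===== VERDICT (by name: the statement is the Claim_ definition above) =====
theorem get_astrology_score_spec : Claim_equal_get_astrology_score := by
  intro a b _ hpre
  obtain ⟨ha, hb⟩ := hpre
  simp only [List.mem_cons, List.not_mem_nil, or_false] at ha hb
  rcases ha with rfl|rfl|rfl|rfl|rfl|rfl|rfl|rfl|rfl|rfl|rfl|rfl <;>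
    rcases hb with rfl|rfl|rfl|rfl|rfl|rfl|rfl|rfl|rfl|rfl|rfl|rfl <;> decide
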